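-- pv_equiv track=rewrite | github.com/arturoornelasb/tibia-bonelord-469-cipher | archive/scripts/core_misc/decode_v6.py | dp_parse
-- ===== SOURCE A (Python) =====
-- GERMAN_WORDS = set([
--     'SO', 'DA', 'JA', 'ZU', 'AN', 'IN', 'UM', 'ES', 'ER', 'WO',
--     'DU', 'OB', 'AM', 'IM', 'AB',
--     'DER', 'DIE', 'DAS', 'DEN', 'DEM', 'DES', 'EIN', 'UND', 'IST',
--     'WIR', 'ICH', 'SIE', 'MAN', 'WER', 'WIE', 'WAS', 'NUR', 'GUT',
--     'MIT', 'VON', 'HAT', 'AUF', 'AUS', 'BEI', 'VOR', 'FUR', 'VOM',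
--     'ZUM', 'ZUR', 'BIS', 'ALS', 'NUN', 'HIN', 'TAG', 'ORT', 'TOD',
--     'OFT', 'NIE', 'ALT', 'NEU', 'GAR', 'NET', 'ODE', 'SEI', 'TUN',
--     'MAL', 'ENDE', 'REDE', 'RUNE', 'WORT',
--     'NACH', 'AUCH', 'NOCH', 'DOCH', 'SICH', 'SIND', 'SEIN', 'WARD',
--     'DASS', 'WENN', 'DANN', 'DENN', 'ABER', 'ODER', 'WEIL', 'WIRD',
--     'EINE', 'DIES', 'HIER', 'DORT', 'WELT', 'ZEIT', 'TEIL', 'SEID',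
--     'NAME', 'GANZ', 'SEHR', 'VIEL', 'FORT', 'HOCH', 'KLAR',
--     'ERDE', 'GOTT', 'HERR', 'BURG', 'BERG', 'GOLD', 'SOHN', 'WAHR',
--     'HELD', 'FACH', 'WIND', 'KANN', 'SOLL', 'WILL', 'MUSS',
--     'MACHT', 'KRAFT', 'GEIST', 'NACHT', 'LICHT', 'REICH',
--     'UNTER', 'DURCH', 'GEGEN', 'IMMER', 'NICHT', 'SCHON',
--     'DIESE', 'SEINE', 'EINEN', 'EINER', 'EINEM', 'EINES',
--     'URALTE', 'STEINEN', 'STEINE', 'STEIN', 'RUNEN', 'FINDEN',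
--     'STEHEN', 'GEHEN', 'KOMMEN', 'SAGEN', 'WISSEN',
--     'ERSTE', 'ANDEREN', 'KOENIG', 'SCHAUN', 'RUIN',
--     'ORTE', 'ORTEN', 'WORTE', 'STEH', 'GEH',
--     'ALLE', 'ALLES', 'VIELE', 'WIEDER', 'WISSET',
--     'MIN', 'SER', 'GEN', 'WEG', 'INS', 'HER',
--     'SEI', 'WAR', 'GAR',
--     'REDE', 'REDEN', 'WESEN', 'ALTE', 'ALTEN', 'ALTER',
--     'HWND', 'OEL', 'SCE', 'MINNE', 'RUCHTIG',
--     'HEARUCHTIG', 'HEARUCHTIGER',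
--     'LABGZERAS', 'HEDEMI', 'ADTHARSC', 'TAUTR',
--     'TOTNIURG', 'TOTNIURGS', 'EDETOTNIURG', 'EDETOTNIURGS',
--     'SCHWITEIONE', 'SCHWITEIO', 'ENGCHD', 'KELSEI',
--     'TIUMENGEMI', 'LABRNI', 'UTRUNR', 'GEVMT',
--     'AUNRSONGETRASES', 'EILCH', 'EILCHANHEARUCHTIG',
--     'DIESEN', 'DIESEM', 'DIESER', 'DIESES',
--     'SEINER', 'SEINEN', 'SEINES', 'SEINEM',
--     'RUNEORT', 'HIHL', 'SANG', 'EDEL', 'ADEL',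
-- ])
--
-- def dp_parse(text):
--     n = len(text)
--     dp = [(0, None)] * (n + 1)
--     for i in range(1, n + 1):
--         dp[i] = (dp[i-1][0], None)
--         for wlen in range(2, min(i, 20) + 1):
--             start = i - wlen
--             cand = text[start:i]
--             if '?' not in cand and cand in GERMAN_WORDS:
--                 score = dp[start][0] + wlen
--                 if score > dp[i][0]:
--                     dp[i] = (score, (start, cand))
--     tokens = []
--     i = n
--     while i > 0:
--         if dp[i][1] is not None:
--             start, word = dp[i][1]
--             tokens.append(('WORD', word))
--             i = start
--         else:
--             tokens.append(('CHAR', text[i-1]))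
--             i -= 1
--     tokens.reverse()
--     merged = []
--     for kind, val in tokens:
--         if kind == 'WORD':
--             merged.append(val)
--         else:
--             if merged and merged[-1].startswith('['):
--                 merged[-1] = merged[-1][:-1] + val + ']'
--             else:
--                 merged.append('[' + val + ']')
--     return merged, dp[n][0]
-- ===== SOURCE B (Python) =====
-- GERMAN_WORDS = set([
--     'SO', 'DA', 'JA', 'ZU', 'AN', 'IN', 'UM', 'ES', 'ER', 'WO',
--     'DU', 'OB', 'AM', 'IM', 'AB',
--     'DER', 'DIE', 'DAS', 'DEN', 'DEM', 'DES', 'EIN', 'UND', 'IST',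
--     'WIR', 'ICH', 'SIE', 'MAN', 'WER', 'WIE', 'WAS', 'NUR', 'GUT',
--     'MIT', 'VON', 'HAT', 'AUF', 'AUS', 'BEI', 'VOR', 'FUR', 'VOM',
--     'ZUM', 'ZUR', 'BIS', 'ALS', 'NUN', 'HIN', 'TAG', 'ORT', 'TOD',
--     'OFT', 'NIE', 'ALT', 'NEU', 'GAR', 'NET', 'ODE', 'SEI', 'TUN',
--     'MAL', 'ENDE', 'REDE', 'RUNE', 'WORT',
--     'NACH', 'AUCH', 'NOCH', 'DOCH', 'SICH', 'SIND', 'SEIN', 'WARD',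
--     'DASS', 'WENN', 'DANN', 'DENN', 'ABER', 'ODER', 'WEIL', 'WIRD',
--     'EINE', 'DIES', 'HIER', 'DORT', 'WELT', 'ZEIT', 'TEIL', 'SEID',
--     'NAME', 'GANZ', 'SEHR', 'VIEL', 'FORT', 'HOCH', 'KLAR',
--     'ERDE', 'GOTT', 'HERR', 'BURG', 'BERG', 'GOLD', 'SOHN', 'WAHR',
--     'HELD', 'FACH', 'WIND', 'KANN', 'SOLL', 'WILL', 'MUSS',
--     'MACHT', 'KRAFT', 'GEIST', 'NACHT', 'LICHT', 'REICH',
--     'UNTER', 'DURCH', 'GEGEN', 'IMMER', 'NICHT', 'SCHON',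
--     'DIESE', 'SEINE', 'EINEN', 'EINER', 'EINEM', 'EINES',
--     'URALTE', 'STEINEN', 'STEINE', 'STEIN', 'RUNEN', 'FINDEN',
--     'STEHEN', 'GEHEN', 'KOMMEN', 'SAGEN', 'WISSEN',
--     'ERSTE', 'ANDEREN', 'KOENIG', 'SCHAUN', 'RUIN',
--     'ORTE', 'ORTEN', 'WORTE', 'STEH', 'GEH',
--     'ALLE', 'ALLES', 'VIELE', 'WIEDER', 'WISSET',
--     'MIN', 'SER', 'GEN', 'WEG', 'INS', 'HER',
--     'SEI', 'WAR', 'GAR',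
--     'REDE', 'REDEN', 'WESEN', 'ALTE', 'ALTEN', 'ALTER',
--     'HWND', 'OEL', 'SCE', 'MINNE', 'RUCHTIG',
--     'HEARUCHTIG', 'HEARUCHTIGER',
--     'LABGZERAS', 'HEDEMI', 'ADTHARSC', 'TAUTR',
--     'TOTNIURG', 'TOTNIURGS', 'EDETOTNIURG', 'EDETOTNIURGS',
--     'SCHWITEIONE', 'SCHWITEIO', 'ENGCHD', 'KELSEI',
--     'TIUMENGEMI', 'LABRNI', 'UTRUNR', 'GEVMT',
--     'AUNRSONGETRASES', 'EILCH', 'EILCHANHEARUCHTIG',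
--     'DIESEN', 'DIESEM', 'DIESER', 'DIESES',
--     'SEINER', 'SEINEN', 'SEINES', 'SEINEM',
--     'RUNEORT', 'HIHL', 'SANG', 'EDEL', 'ADEL',
-- ])
--
--
-- def dp_parse(text):
--     # B: top-down memoized recursion over prefix length; each memo entry holds the
--     # score and a structure-shared linked chain of the tokens of the best parse of
--     # that prefix, so A's dp array, backpointers and backtracking loop disappear.
--     # A driver loop fills the memo in dependency order to keep recursion shallow.
--     n = len(text)
--     memo = {}
--
--     def best(i):
--         # (score, token chain (last token first)) for text[:i]
--         if i == 0:
--             return (0, None)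
--         if i in memo:
--             return memo[i]
--         prev = best(i - 1)
--         score = prev[0]
--         pick = None
--         for wlen in range(2, min(i, 20) + 1):
--             cand = text[i - wlen:i]
--             if '?' not in cand and cand in GERMAN_WORDS:
--                 s = best(i - wlen)[0] + wlen
--                 if s > score:
--                     score = s
--                     pick = (i - wlen, cand)
--         if pick is None:
--             entry = (score, (('CHAR', text[i - 1]), prev[1]))
--         else:
--             start, word = pick
--             entry = (score, (('WORD', word), best(start)[1]))
--         memo[i] = entry
--         return entry
--
--     for j in range(1, n + 1):
--         best(j)
--     score, chain = best(n)
--     tokens = []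
--     while chain is not None:
--         tokens.append(chain[0])
--         chain = chain[1]
--     tokens.reverse()
--     merged = []
--     for kind, val in tokens:
--         if kind == 'WORD':
--             merged.append(val)
--         else:
--             if merged and merged[-1].startswith('['):
--                 merged[-1] = merged[-1][:-1] + val + ']'
--             else:
--                 merged.append('[' + val + ']')
--     return merged, score
-- ===== Notes on version B (the rewrite author's own statement) =====
-- stated objective: alternative
-- what changed: Replaced A's bottom-up dp array with (start,word) backpointers, its separate table-driven backtracking loop and token-list reversal by a top-down memoized recursion over prefix length whose memo entry carries a structure-shared linked chain of the tokens of that prefix's best parse (a driver loop fills the memo in dependency order to keep recursion shallow); only the final one-pass bracket-merge of CHAR runs is kept.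
import Mathlib
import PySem

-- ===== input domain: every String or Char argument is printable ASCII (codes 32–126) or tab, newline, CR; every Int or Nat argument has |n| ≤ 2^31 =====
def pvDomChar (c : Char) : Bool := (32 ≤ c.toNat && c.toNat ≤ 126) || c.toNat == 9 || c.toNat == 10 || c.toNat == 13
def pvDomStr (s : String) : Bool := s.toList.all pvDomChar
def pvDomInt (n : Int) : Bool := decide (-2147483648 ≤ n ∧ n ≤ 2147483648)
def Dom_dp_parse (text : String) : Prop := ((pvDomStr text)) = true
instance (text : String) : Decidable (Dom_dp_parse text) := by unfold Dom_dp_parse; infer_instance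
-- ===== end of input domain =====

-- B replaces A's bottom-up dp array with backpointers and its backtracking pass by a top-down
-- memoized recursion over prefix length whose memo value carries a structure-shared chain of the
-- tokens of that prefix's best parse; objective: alternative decomposition, same recurrence/tie-breaks.

-- shared module constant GERMAN_WORDS (both Pythons read the same set)
def germanWordsSrc : List String := [
  "SO", "DA", "JA", "ZU", "AN", "IN", "UM", "ES", "ER", "WO",
  "DU", "OB", "AM", "IM", "AB",
  "DER", "DIE", "DAS", "DEN", "DEM", "DES", "EIN", "UND", "IST",
  "WIR", "ICH", "SIE", "MAN", "WER", "WIE", "WAS", "NUR", "GUT",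
  "MIT", "VON", "HAT", "AUF", "AUS", "BEI", "VOR", "FUR", "VOM",
  "ZUM", "ZUR", "BIS", "ALS", "NUN", "HIN", "TAG", "ORT", "TOD",
  "OFT", "NIE", "ALT", "NEU", "GAR", "NET", "ODE", "SEI", "TUN",
  "MAL", "ENDE", "REDE", "RUNE", "WORT",
  "NACH", "AUCH", "NOCH", "DOCH", "SICH", "SIND", "SEIN", "WARD",
  "DASS", "WENN", "DANN", "DENN", "ABER", "ODER", "WEIL", "WIRD",
  "EINE", "DIES", "HIER", "DORT", "WELT", "ZEIT", "TEIL", "SEID",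
  "NAME", "GANZ", "SEHR", "VIEL", "FORT", "HOCH", "KLAR",
  "ERDE", "GOTT", "HERR", "BURG", "BERG", "GOLD", "SOHN", "WAHR",
  "HELD", "FACH", "WIND", "KANN", "SOLL", "WILL", "MUSS",
  "MACHT", "KRAFT", "GEIST", "NACHT", "LICHT", "REICH",
  "UNTER", "DURCH", "GEGEN", "IMMER", "NICHT", "SCHON",
  "DIESE", "SEINE", "EINEN", "EINER", "EINEM", "EINES",
  "URALTE", "STEINEN", "STEINE", "STEIN", "RUNEN", "FINDEN",
  "STEHEN", "GEHEN", "KOMMEN", "SAGEN", "WISSEN",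
  "ERSTE", "ANDEREN", "KOENIG", "SCHAUN", "RUIN",
  "ORTE", "ORTEN", "WORTE", "STEH", "GEH",
  "ALLE", "ALLES", "VIELE", "WIEDER", "WISSET",
  "MIN", "SER", "GEN", "WEG", "INS", "HER",
  "SEI", "WAR", "GAR",
  "REDE", "REDEN", "WESEN", "ALTE", "ALTEN", "ALTER",
  "HWND", "OEL", "SCE", "MINNE", "RUCHTIG",
  "HEARUCHTIG", "HEARUCHTIGER",
  "LABGZERAS", "HEDEMI", "ADTHARSC", "TAUTR",
  "TOTNIURG", "TOTNIURGS", "EDETOTNIURG", "EDETOTNIURGS",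
  "SCHWITEIONE", "SCHWITEIO", "ENGCHD", "KELSEI",
  "TIUMENGEMI", "LABRNI", "UTRUNR", "GEVMT",
  "AUNRSONGETRASES", "EILCH", "EILCHANHEARUCHTIG",
  "DIESEN", "DIESEM", "DIESER", "DIESES",
  "SEINER", "SEINEN", "SEINES", "SEINEM",
  "RUNEORT", "HIHL", "SANG", "EDEL", "ADEL"]

def germanWords : PySem.Set (List Char) := PySem.Set.ofList (germanWordsSrc.map String.toList)

-- a dp entry of A: (score, optional backpointer (start, word)); all Python indices here are
-- nonnegative and in range, so slices are drop/take (PySem.List.slice_natCast) and indices are Nat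
abbrev DpEntry : Type := Int × Option (Nat × List Char)

-- ===== PORT A =====
-- A's inner 'for wlen in range(2, min(i,20)+1)' update loop
def dpInnerA (cs : List Char) (dp : List DpEntry) (i : Nat) : DpEntry :=
  (List.range' 2 (min i 20 - 1)).foldl
    (fun acc wlen =>
      let cand := (cs.drop (i - wlen)).take wlen
      if !cand.contains '?' && PySem.Set.contains germanWords cand then
        let score := (dp.getD (i - wlen) (0, none)).1 + (wlen : Int)
        if acc.1 < score then (score, some (i - wlen, cand)) else acc
      else acc)
    ((dp.getD (i - 1) (0, none)).1, none)

-- 'for i in range(1, n+1): dp[i] = …' (dp is filled in index order = append)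
def dpTableA (cs : List Char) : List DpEntry :=
  (List.range' 1 cs.length).foldl (fun dp i => dp ++ [dpInnerA cs dp i]) [(0, none)]

-- backtracking 'while i > 0' loop; fuel only makes the recursion structural (each step strictly
-- decreases i, so fuel = n never runs out); getD defaults are never read (i stays in range)
def tokensA (cs : List Char) (dp : List DpEntry) : Nat → Nat → List (Bool × List Char)
  | 0, _ => []
  | fuel + 1, i =>
    if i = 0 then []
    else
      match (dp.getD i (0, none)).2 with
      | some (start, word) => (true, word) :: tokensA cs dp fuel start
      | none => (false, [cs.getD (i - 1) '?']) :: tokensA cs dp fuel (i - 1)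

-- body of A's forward merging loop ('startswith('[')' on a possibly empty string = head test)
def appendTok (merged : List (List Char)) (t : Bool × List Char) : List (List Char) :=
  if t.1 then merged ++ [t.2]
  else
    match merged.getLast? with
    | some la =>
      if la.head? = some '[' then merged.dropLast ++ [la.dropLast ++ t.2 ++ [']']]
      else merged ++ [['['] ++ t.2 ++ [']']]
    | none => merged ++ [['['] ++ t.2 ++ [']']]

def dp_parse (text : String) : List String × Int :=
  let cs := text.toList
  let dp := dpTableA cs
  let tokens := (tokensA cs dp cs.length cs.length).reverse
  ((tokens.foldl appendTok []).map (fun p => String.mk p), (dp.getD cs.length (0, none)).1)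

-- ===== PORT B =====
-- B's memo value: (score, token chain of the prefix's best parse, last token first);
-- the Python nested-pair chain (tok, rest)/None is the Lean list tok :: rest / []
abbrev MemoE : Type := Int × List (Bool × List Char)

-- B's 'for wlen in range(2, min(i,20)+1)' candidate loop; 'look j' is best(j)[0]
def innerB (cs : List Char) (look : Nat → Int) (i : Nat) (init : Int) :
    Int × Option (Nat × List Char) :=
  (List.range' 2 (min i 20 - 1)).foldl
    (fun acc wlen =>
      let cand := (cs.drop (i - wlen)).take wlen
      if !cand.contains '?' && PySem.Set.contains germanWords cand then
        let s := look (i - wlen) + (wlen : Int)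
        if acc.1 < s then (s, some (i - wlen, cand)) else acc
      else acc)
    (init, none)

-- B's recursive 'best(i)' with memo dict; fuel only makes the recursion structural (every
-- recursive call strictly decreases i, so fuel = i+1 suffices and the driver passes n+1).
-- The driver fills the memo in ascending order, so the inner best() calls are memo hits and
-- return the memo unchanged; the port reads their value component accordingly.
def bestB (cs : List Char) : Nat → PySem.Dict Nat MemoE → Nat → MemoE × PySem.Dict Nat MemoE
  | 0, memo, _ => ((0, []), memo)
  | fuel + 1, memo, i =>
    if i = 0 then ((0, []), memo)
    else
      match memo.get? i with
      | some v => (v, memo)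
      | none =>
        let prev := (bestB cs fuel memo (i - 1)).1
        let r := innerB cs (fun j => (bestB cs fuel memo j).1.1) i prev.1
        let chain :=
          match r.2 with
          | none => (false, [cs.getD (i - 1) '?']) :: prev.2
          | some (start, word) => (true, word) :: (bestB cs fuel memo start).1.2
        ((r.1, chain), memo.insert i (r.1, chain))

-- 'while chain is not None: tokens.append(chain[0]); chain = chain[1]'
def unwindB : List (Bool × List Char) → List (Bool × List Char) → List (Bool × List Char)
  | [], tokens => tokens
  | t :: chain, tokens => unwindB chain (tokens ++ [t])

-- body of B's final merging loop (same merge rule as A's; 'startswith' = head test)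
def appendTokAlt (merged : List (List Char)) (t : Bool × List Char) : List (List Char) :=
  if t.1 then merged ++ [t.2]
  else
    match merged.getLast? with
    | some la =>
      if la.head? = some '[' then merged.dropLast ++ [la.dropLast ++ t.2 ++ [']']]
      else merged ++ [['['] ++ t.2 ++ [']']]
    | none => merged ++ [['['] ++ t.2 ++ [']']]

-- 'for j in range(1, n+1): best(j)' then unwind the chain of best(n) and merge
def dp_parse_alt (text : String) : List String × Int :=
  let cs := text.toList
  let n := cs.length
  let memo := (List.range' 1 n).foldl (fun m j => (bestB cs (n + 1) m j).2) PySem.Dict.empty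
  let fin := (bestB cs (n + 1) memo n).1
  let tokens := (unwindB fin.2 []).reverse
  ((tokens.foldl appendTokAlt []).map (fun p => String.mk p), fin.1)

-- ===== PRECONDITION & SPEC =====
def Spec_dp_parse (text : String) (out : List String × Int) : Prop := out = dp_parse_alt text
instance (text : String) (out : List String × Int) : Decidable (Spec_dp_parse text out) := by unfold Spec_dp_parse; infer_instance

-- ===== CLAIM (what is proved, stated in full; the proofs are below) =====
def Claim_equal_dp_parse : Prop := ∀ (text : String), Dom_dp_parse text → Spec_dp_parse text (dp_parse text)

-- ===== LEMMAS AND PROOFS =====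

-- A's table truncated after m iterations of the filling loop
def tabA (cs : List Char) (m : Nat) : List DpEntry :=
  (List.range' 1 m).foldl (fun dp i => dp ++ [dpInnerA cs dp i]) [(0, none)]

-- score and backpointer of A's finished table
def sA (cs : List Char) (j : Nat) : Int := ((dpTableA cs).getD j (0, none)).1
def bpA (cs : List Char) (j : Nat) : Option (Nat × List Char) := ((dpTableA cs).getD j (0, none)).2

theorem dpTableA_eq_tabA (cs : List Char) : dpTableA cs = tabA cs cs.length := rfl

theorem tabA_succ (cs : List Char) (m : Nat) :
    tabA cs (m + 1) = tabA cs m ++ [dpInnerA cs (tabA cs m) (m + 1)] := by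
  unfold tabA
  rw [List.range'_concat, List.foldl_append]
  simp [Nat.add_comm]

theorem tabA_length (cs : List Char) (m : Nat) : (tabA cs m).length = m + 1 := by
  induction m with
  | zero => rfl
  | succ m ih => rw [tabA_succ]; simp [ih]

theorem tabA_stable (cs : List Char) {m m' j : Nat} (hj : j ≤ m) (hmm : m ≤ m') :
    (tabA cs m').getD j (0, none) = (tabA cs m).getD j (0, none) := by
  induction m' with
  | zero => cases Nat.le_zero.mp hmm; rfl
  | succ m' ih =>
    rcases Nat.lt_or_ge m (m' + 1) with h | h
    · have hm : m ≤ m' := Nat.lt_succ_iff.mp h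
      rw [tabA_succ, List.getD_append _ _ _ j (by rw [tabA_length]; omega), ih hm]
    · have : m = m' + 1 := Nat.le_antisymm hmm h
      subst this; rfl

theorem dpInnerA_congr (cs : List Char) (dp dp' : List DpEntry) (i : Nat) (hi : 1 ≤ i)
    (h : ∀ j < i, dp.getD j (0, none) = dp'.getD j (0, none)) :
    dpInnerA cs dp i = dpInnerA cs dp' i := by
  unfold dpInnerA
  rw [h (i - 1) (by omega)]
  apply PySem.List.foldl_congr_mem
  intro acc wlen hw
  have h2 : 2 ≤ wlen := (List.mem_range'_1.mp hw).1
  have : dp.getD (i - wlen) (0, none) = dp'.getD (i - wlen) (0, none) := h _ (by omega)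
  simp only [this]

theorem sA_bpA_val (cs : List Char) {i : Nat} (h1 : 1 ≤ i) (h2 : i ≤ cs.length) :
    (sA cs i, bpA cs i) = dpInnerA cs (dpTableA cs) i := by
  obtain ⟨m, rfl⟩ : ∃ m, i = m + 1 := ⟨i - 1, by omega⟩
  have hi : (tabA cs cs.length).getD (m + 1) (0, none) = dpInnerA cs (tabA cs m) (m + 1) := by
    rw [tabA_stable cs (le_refl (m + 1)) h2, tabA_succ]
    have hlen : (tabA cs m).length = m + 1 := tabA_length cs m
    rw [← hlen]
    simp [List.getD]
  have hcong : dpInnerA cs (tabA cs m) (m + 1) = dpInnerA cs (dpTableA cs) (m + 1) := by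
    apply dpInnerA_congr cs _ _ (m + 1) h1
    intro j hj
    rw [dpTableA_eq_tabA]
    exact (tabA_stable cs (by omega : j ≤ m) (by omega)).symm
  unfold sA bpA
  rw [dpTableA_eq_tabA, hi, hcong]
  rfl

theorem dpInnerA_bp_lt (cs : List Char) (dp : List DpEntry) (i : Nat) (hi : 1 ≤ i)
    {st : Nat} {w : List Char} (h : (dpInnerA cs dp i).2 = some (st, w)) : st < i := by
  unfold dpInnerA at h
  revert h
  refine List.foldlRecOn _ _ (motive := fun (acc : DpEntry) => acc.2 = some (st, w) → st < i) ?_ ?_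
  · intro h; simp at h
  · intro acc ih wlen hw
    have h2 : 2 ≤ wlen := (List.mem_range'_1.mp hw).1
    by_cases hc : (!((cs.drop (i - wlen)).take wlen).contains '?'
        && PySem.Set.contains germanWords ((cs.drop (i - wlen)).take wlen)) = true
    · simp only [hc, if_true]
      by_cases hlt : acc.1 < (dp.getD (i - wlen) (0, none)).1 + (wlen : Int)
      · simp only [hlt, if_true]
        intro h; simp at h; omega
      · simp only [hlt, if_false]; exact ih
    · simp only [hc]; exact ih

theorem bpA_zero (cs : List Char) : bpA cs 0 = none := by
  unfold bpA
  rw [dpTableA_eq_tabA, tabA_stable cs (le_refl 0) (Nat.zero_le _)]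
  rfl

theorem sA_zero (cs : List Char) : sA cs 0 = 0 := by
  unfold sA
  rw [dpTableA_eq_tabA, tabA_stable cs (le_refl 0) (Nat.zero_le _)]
  rfl

theorem bpA_lt (cs : List Char) {i st : Nat} {w : List Char}
    (h : bpA cs i = some (st, w)) : st < i := by
  rcases Nat.eq_zero_or_pos i with h0 | h1
  · subst h0; rw [bpA_zero] at h; cases h
  · by_cases h2 : i ≤ cs.length
    · have := sA_bpA_val cs h1 h2
      have hbp : bpA cs i = (dpInnerA cs (dpTableA cs) i).2 := by
        rw [← this]
      exact dpInnerA_bp_lt cs (dpTableA cs) i h1 (by rw [← hbp]; exact h)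
    case neg =>
      exfalso
      unfold bpA at h
      rw [dpTableA_eq_tabA, List.getD_eq_default] at h
      · cases h
      · rw [tabA_length]; omega

theorem tokensA_eq_of_le (cs : List Char) :
    ∀ f g i, i ≤ f → i ≤ g →
      tokensA cs (dpTableA cs) f i = tokensA cs (dpTableA cs) g i := by
  intro f
  induction f with
  | zero => intro g i hf _; interval_cases i; cases g <;> rfl
  | succ f ih =>
    intro g i hf hg
    rcases Nat.eq_zero_or_pos i with h0 | h1
    · subst h0; cases g <;> rfl
    · obtain ⟨g', rfl⟩ : ∃ g', g = g' + 1 := ⟨g - 1, by omega⟩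
      show tokensA cs (dpTableA cs) (f + 1) i = tokensA cs (dpTableA cs) (g' + 1) i
      unfold tokensA
      have hne : ¬ i = 0 := by omega
      simp only [hne, if_false]
      have hbpa : ((dpTableA cs).getD i (0, none)).2 = bpA cs i := rfl
      rw [hbpa]
      cases hbp : bpA cs i with
      | none => rw [ih g' (i - 1) (by omega) (by omega)]
      | some p =>
        obtain ⟨st, w⟩ := p
        have hlt : st < i := bpA_lt cs hbp
        show (true, w) :: tokensA cs (dpTableA cs) f st
            = (true, w) :: tokensA cs (dpTableA cs) g' st
        rw [ih g' st (by omega) (by omega)]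

theorem tokensA_mono (cs : List Char) {f i : Nat} (h : i ≤ f) :
    tokensA cs (dpTableA cs) f i = tokensA cs (dpTableA cs) i i :=
  tokensA_eq_of_le cs f i i h (le_refl i)

theorem unwindB_eq (chain : List (Bool × List Char)) :
    ∀ tokens, unwindB chain tokens = tokens ++ chain := by
  induction chain with
  | nil => intro tokens; simp [unwindB]
  | cons t c ih => intro tokens; simp [unwindB, ih]

-- memo invariant after the driver has processed prefixes 1..k
def GoodMemo (cs : List Char) (memo : PySem.Dict Nat MemoE) (k : Nat) : Prop :=
  ∀ j, (1 ≤ j ∧ j ≤ k → memo.get? j = some (sA cs j, tokensA cs (dpTableA cs) j j)) ∧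
       (k < j → memo.get? j = none)

theorem bestB_le (cs : List Char) {memo : PySem.Dict Nat MemoE} {k : Nat}
    (hG : GoodMemo cs memo k) {j f : Nat} (hj : j ≤ k) (hf : j ≤ f) :
    bestB cs f memo j = ((sA cs j, tokensA cs (dpTableA cs) j j), memo) := by
  rcases Nat.eq_zero_or_pos j with h0 | h1
  · subst h0
    rw [sA_zero]
    cases f <;> rfl
  · obtain ⟨f', rfl⟩ : ∃ f', f = f' + 1 := ⟨f - 1, by omega⟩
    show bestB cs (f' + 1) memo j = _
    unfold bestB
    have hne : ¬ j = 0 := by omega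
    simp only [hne, if_false]
    rw [(hG j).1 ⟨h1, hj⟩]

theorem innerB_spec (cs : List Char) (look : Nat → Int) {i : Nat}
    (h1 : 1 ≤ i) (h2 : i ≤ cs.length) (hlook : ∀ j, j < i → look j = sA cs j) :
    innerB cs look i (sA cs (i - 1)) = (sA cs i, bpA cs i) := by
  rw [sA_bpA_val cs h1 h2]
  unfold innerB dpInnerA
  apply PySem.List.foldl_congr_mem
  intro acc wlen hw
  have h2w : 2 ≤ wlen := (List.mem_range'_1.mp hw).1
  simp only [hlook (i - wlen) (by omega), sA]

theorem bestB_step (cs : List Char) {memo : PySem.Dict Nat MemoE} {k f : Nat}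
    (hG : GoodMemo cs memo k) (hf : k + 1 ≤ f) (hk : k + 1 ≤ cs.length) :
    bestB cs (f + 1) memo (k + 1)
      = ((sA cs (k + 1), tokensA cs (dpTableA cs) (k + 1) (k + 1)),
         memo.insert (k + 1) (sA cs (k + 1), tokensA cs (dpTableA cs) (k + 1) (k + 1))) := by
  have hne : ¬ (k + 1 = 0) := by omega
  have hget : memo.get? (k + 1) = none := (hG (k + 1)).2 (by omega)
  have hprev : bestB cs f memo k = ((sA cs k, tokensA cs (dpTableA cs) k k), memo) :=
    bestB_le cs hG (le_refl k) (by omega)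
  have hinner : innerB cs (fun j => (bestB cs f memo j).1.1) (k + 1) (sA cs k)
      = (sA cs (k + 1), bpA cs (k + 1)) := by
    have := innerB_spec cs (fun j => (bestB cs f memo j).1.1) (i := k + 1)
      (by omega) hk (fun j hj => by
        have hb := bestB_le cs hG (j := j) (f := f) (by omega) (by omega)
        simp [hb])
    simpa using this
  simp only [bestB, hne, if_false, hget, Nat.add_sub_cancel, hprev]
  simp only [hinner]
  cases hbp : bpA cs (k + 1) with
  | none =>
    have hm : tokensA cs (dpTableA cs) (k + 1) (k + 1)
        = (false, [cs.getD (k + 1 - 1) '?']) :: tokensA cs (dpTableA cs) k k := by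
      conv_lhs => unfold tokensA
      have hbpa : ((dpTableA cs).getD (k + 1) (0, none)).2 = bpA cs (k + 1) := rfl
      simp only [hne, if_false, hbpa, hbp, Nat.add_sub_cancel]
    rw [hm]
    rfl
  | some p =>
    obtain ⟨st, w⟩ := p
    have hst : st < k + 1 := bpA_lt cs hbp
    have hb : bestB cs f memo st = ((sA cs st, tokensA cs (dpTableA cs) st st), memo) :=
      bestB_le cs hG (by omega) (by omega)
    have hm : tokensA cs (dpTableA cs) (k + 1) (k + 1)
        = (true, w) :: tokensA cs (dpTableA cs) st st := by
      conv_lhs => unfold tokensA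
      have hbpa : ((dpTableA cs).getD (k + 1) (0, none)).2 = bpA cs (k + 1) := rfl
      simp only [hne, if_false, hbpa, hbp]
      rw [tokensA_mono cs (by omega : st ≤ k)]
    simp only [hb, hm]

theorem goodMemo_empty (cs : List Char) : GoodMemo cs PySem.Dict.empty 0 := by
  intro j
  constructor
  · intro h; omega
  · intro _; exact PySem.Dict.get?_empty j

theorem goodMemo_insert (cs : List Char) {memo : PySem.Dict Nat MemoE} {k : Nat}
    (hG : GoodMemo cs memo k) :
    GoodMemo cs (memo.insert (k + 1) (sA cs (k + 1), tokensA cs (dpTableA cs) (k + 1) (k + 1))) (k + 1) := by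
  intro j
  constructor
  · intro ⟨h1, h2⟩
    rw [PySem.Dict.get?_insert]
    by_cases hj : j = k + 1
    · subst hj; simp
    · rw [if_neg hj, (hG j).1 ⟨h1, by omega⟩]
  · intro h
    rw [PySem.Dict.get?_insert, if_neg (by omega), (hG j).2 (by omega)]

theorem driver (cs : List Char) :
    ∀ (m k : Nat) (memo : PySem.Dict Nat MemoE), GoodMemo cs memo k → k + m ≤ cs.length →
    GoodMemo cs ((List.range' (k + 1) m).foldl
      (fun mm j => (bestB cs (cs.length + 1) mm j).2) memo) (k + m) := by
  intro m
  induction m with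
  | zero => intro k memo hG _; simpa using hG
  | succ m ih =>
    intro k memo hG hkm
    rw [List.range'_succ]
    simp only [List.foldl_cons]
    have hstep := bestB_step cs hG (by omega : k + 1 ≤ cs.length) (by omega : k + 1 ≤ cs.length)
    rw [hstep]
    have := ih (k + 1) _ (goodMemo_insert cs hG) (by omega)
    have harr : k + 1 + m = k + (m + 1) := by omega
    rw [harr] at this
    exact this

theorem dp_parse_spec : Claim_equal_dp_parse := by
  intro text _
  show dp_parse text = dp_parse_alt text
  unfold dp_parse dp_parse_alt
  set cs := text.toList with hcs
  have hG0 := driver cs cs.length 0 PySem.Dict.empty (goodMemo_empty cs) (by omega)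
  simp only [Nat.zero_add] at hG0
  have hfin : (bestB cs (cs.length + 1)
      ((List.range' 1 cs.length).foldl
        (fun m j => (bestB cs (cs.length + 1) m j).2) PySem.Dict.empty) cs.length).1
      = (sA cs cs.length, tokensA cs (dpTableA cs) cs.length cs.length) := by
    rw [bestB_le cs hG0 (le_refl _) (by omega)]
  simp only [hfin]
  rw [unwindB_eq]
  rfl
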